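-- pv_equiv track=rewrite | github.com/skimmy/lib-bio | src/simulator/util/scripts.py | horizontalCross
-- ===== SOURCE A (Python) =====
-- def horizontalCross(script, r):
--     i = 0
--     j = 0
--     for op in script:
--         next_i = i
--         next_j = j
--         if (op == 'M') or (op == 'S') or (op == 'D'):
--             next_i = i+1
--         if (op == 'M') or (op == 'S') or (op == 'I'):
--             next_j = j+1
--         if (next_j >= r):
--             return (i,j)
--         i = next_i
--         j = next_j
-- ===== SOURCE B (Python) =====
-- from itertools import accumulate
--
--
-- def horizontalCross(script, r):
--     for k, c in enumerate(accumulate(1 if op in ('M', 'S', 'I') else 0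
--                                      for op in script)):
--         if c >= r:
--             prefix = script[:k]
--             return (sum(1 for op in prefix if op in ('M', 'S', 'D')),
--                     sum(1 for op in prefix if op in ('M', 'S', 'I')))
--     return None
-- ===== Notes on version B (the rewrite author's own statement) =====
-- stated objective: alternative
-- what changed: Replaces A's fused single pass carrying (i,j) state with a table-based decomposition: build the inclusive cumulative j-count with itertools.accumulate, find the first index k where it reaches r, then compute i and j as two separate counts over script[:k].
import Mathlib
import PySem

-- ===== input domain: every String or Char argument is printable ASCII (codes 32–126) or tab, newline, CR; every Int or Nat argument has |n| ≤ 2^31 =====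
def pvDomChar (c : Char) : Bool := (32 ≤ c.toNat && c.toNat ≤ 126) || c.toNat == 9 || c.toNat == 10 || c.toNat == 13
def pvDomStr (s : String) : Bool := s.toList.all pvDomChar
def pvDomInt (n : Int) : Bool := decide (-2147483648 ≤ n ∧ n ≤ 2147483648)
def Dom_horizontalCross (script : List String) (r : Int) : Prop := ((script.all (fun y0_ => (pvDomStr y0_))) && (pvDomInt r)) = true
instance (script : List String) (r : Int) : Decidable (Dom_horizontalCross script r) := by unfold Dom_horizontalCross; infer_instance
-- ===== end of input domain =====

-- B replaces A's fused stateful scan by an accumulate table + first-threshold index + two prefix counts (alternative decomposition, same cost).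

-- op in ('M','S','D') / ('M','S','I')
def isMSD (op : String) : Bool := op == "M" || op == "S" || op == "D"
def isMSI (op : String) : Bool := op == "M" || op == "S" || op == "I"

-- ===== PORT A =====
def hcLoop (r i j : Int) : List String → Option (Int × Int)
  | [] => none
  | op :: rest =>
      let next_i := if isMSD op then i + 1 else i
      let next_j := if isMSI op then j + 1 else j
      if next_j ≥ r then some (i, j)
      else hcLoop r next_i next_j rest

def horizontalCross (script : List String) (r : Int) : Option (Int × Int) :=
  hcLoop r 0 0 script

-- ===== PORT B =====
-- itertools.accumulate of the 0/1 generator, starting from acc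
def accMSI (acc : Int) : List String → List Int
  | [] => []
  | op :: rest =>
      let acc' := acc + (if isMSI op then 1 else 0)
      acc' :: accMSI acc' rest

def horizontalCross_alt (script : List String) (r : Int) : Option (Int × Int) :=
  match (accMSI 0 script).findIdx? (fun c => decide (c ≥ r)) with
  | none => none
  | some k =>
      let pre := script.take k
      some (((pre.filter isMSD).length : Int), ((pre.filter isMSI).length : Int))

-- ===== PRECONDITION & SPEC =====
def Spec_horizontalCross (script : List String) (r : Int) (out : Option (Int × Int)) : Prop := out = horizontalCross_alt script r
instance (script : List String) (r : Int) (out : Option (Int × Int)) : Decidable (Spec_horizontalCross script r out) := by unfold Spec_horizontalCross; infer_instance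

-- ===== CLAIM (what is proved, stated in full; the proofs are below) =====
def Claim_equal_horizontalCross : Prop := ∀ (script : List String) (r : Int), Dom_horizontalCross script r → Spec_horizontalCross script r (horizontalCross script r)

-- ===== LEMMAS AND PROOFS =====

-- A's loop, characterised by B's decomposition: the threshold index in the accumulate
-- table started at j, and the two prefix counts offset by the carried state (i, j).
theorem hcLoop_eq (r : Int) : ∀ (script : List String) (i j : Int),
    hcLoop r i j script =
      match (accMSI j script).findIdx? (fun c => decide (c ≥ r)) with
      | none => none
      | some k => some (i + ((script.take k).filter isMSD).length,
                        j + ((script.take k).filter isMSI).length) := by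
  intro script
  induction script with
  | nil => intro i j; simp [hcLoop, accMSI]
  | cons op rest ih =>
      intro i j
      have hnj : (if isMSI op then j + 1 else j) = j + (if isMSI op then (1:Int) else 0) := by
        split_ifs <;> ring
      have hni : (if isMSD op then i + 1 else i) = i + (if isMSD op then (1:Int) else 0) := by
        split_ifs <;> ring
      simp only [hcLoop, accMSI, hnj, hni, List.findIdx?_cons]
      by_cases h : j + (if isMSI op then (1:Int) else 0) ≥ r
      · rw [if_pos h, if_pos (by exact decide_eq_true h)]
        simp
      · have hdec := decide_eq_false h
        rw [if_neg h, ih, hdec]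
        simp only [Bool.false_eq_true, if_false]
        cases hf : (accMSI (j + (if isMSI op then (1:Int) else 0)) rest).findIdx?
            (fun c => decide (c ≥ r)) with
        | none => simp
        | some k =>
            simp only [Option.map_some, List.take_succ_cons, List.filter_cons]
            by_cases hd : isMSD op <;> by_cases hsi : isMSI op <;>
              simp [hd, hsi, Prod.ext_iff] <;> omega

theorem horizontalCross_spec : Claim_equal_horizontalCross := by
  intro script r _
  unfold Spec_horizontalCross horizontalCross horizontalCross_alt
  rw [hcLoop_eq]
  cases hf : (accMSI 0 script).findIdx? (fun c => decide (c ≥ r)) <;> simp
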